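-- pv_equiv track=rewrite | github.com/LittleAtariXE/Draconus | app/hive/compiler/tools/starter.py | _reverse_and_decrement
-- ===== SOURCE A (Python) =====
-- def _reverse_and_decrement(byte_array):
--     counter = 0
--     while counter < 3:
--         temp_array = byte_array.copy()
--         for i in range(len(byte_array)):
--             temp_array[i] = byte_array[len(byte_array) - i - 1] - 3
--         byte_array = temp_array
--         counter += 1
--     return byte_array
-- ===== SOURCE B (Python) =====
-- def _reverse_and_decrement(byte_array):
--     return [x - 9 for x in reversed(byte_array)]
-- ===== Notes on version B (the rewrite author's own statement) =====
-- stated objective: simpler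
-- what changed: Collapses the three reverse-and-subtract-3 passes into a single comprehension returning the input reversed with 9 subtracted from each element.
import Mathlib
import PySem

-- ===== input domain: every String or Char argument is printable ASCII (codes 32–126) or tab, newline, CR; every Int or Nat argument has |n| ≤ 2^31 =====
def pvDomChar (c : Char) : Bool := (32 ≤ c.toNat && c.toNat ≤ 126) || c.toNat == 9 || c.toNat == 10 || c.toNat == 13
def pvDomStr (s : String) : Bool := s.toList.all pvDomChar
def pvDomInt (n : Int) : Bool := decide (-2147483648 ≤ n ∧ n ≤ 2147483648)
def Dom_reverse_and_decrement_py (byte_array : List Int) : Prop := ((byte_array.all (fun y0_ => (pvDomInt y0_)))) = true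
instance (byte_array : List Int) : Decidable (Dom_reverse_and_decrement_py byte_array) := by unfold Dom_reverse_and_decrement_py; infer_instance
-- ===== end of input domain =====

-- B replaces A's three reverse-and-subtract-3 passes by one pass: reverse the list and subtract 9 from each element (objective: simpler).

-- ===== PORT A =====
-- one iteration of the while body: temp = copy; for i in range(len): temp[i] = byte_array[len-i-1] - 3
def pvStepA (xs : List Int) : List Int :=
  (List.range xs.length).foldl
    (fun temp i => temp.set i ((xs.getD (xs.length - i - 1) 0) - 3)) xs

def reverse_and_decrement_py (byte_array : List Int) : List Int :=
  -- while counter < 3: … ; counter += 1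
  (List.range 3).foldl (fun ba _ => pvStepA ba) byte_array

-- ===== PORT B =====
def reverse_and_decrement_py_alt (byte_array : List Int) : List Int :=
  byte_array.reverse.map (fun x => x - 9)

-- ===== PRECONDITION & SPEC =====
def Spec_reverse_and_decrement_py (byte_array : List Int) (out : List Int) : Prop := out = reverse_and_decrement_py_alt byte_array
instance (byte_array : List Int) (out : List Int) : Decidable (Spec_reverse_and_decrement_py byte_array out) := by unfold Spec_reverse_and_decrement_py; infer_instance

-- ===== CLAIM (what is proved, stated in full; the proofs are below) =====
def Claim_equal_reverse_and_decrement_py : Prop := ∀ (byte_array : List Int), Dom_reverse_and_decrement_py byte_array → Spec_reverse_and_decrement_py byte_array (reverse_and_decrement_py byte_array)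

-- ===== LEMMAS AND PROOFS =====

-- the for-loop writes f i into slot i for every i < n, n ≤ t0.length
theorem pvFoldSet (f : Nat → Int) :
    ∀ (n : Nat) (t0 : List Int), n ≤ t0.length →
      (List.range n).foldl (fun t i => t.set i (f i)) t0
        = (List.range n).map f ++ t0.drop n := by
  intro n
  induction n with
  | zero => intro t0 _; simp
  | succ n ih =>
    intro t0 hn
    rw [List.range_succ, List.foldl_append, ih t0 (Nat.le_of_succ_le hn)]
    have hlt : n < t0.length := hn
    have hmaplen : ((List.range n).map f).length = n := by simp
    have hdrop : t0.drop n = t0[n] :: t0.drop (n + 1) :=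
      (List.drop_eq_getElem_cons hlt)
    simp only [List.foldl_cons, List.foldl_nil]
    rw [hdrop]
    simp [hmaplen]
    rw [hdrop, List.set_cons_zero]

theorem pvStepA_eq (xs : List Int) : pvStepA xs = xs.reverse.map (fun x => x - 3) := by
  unfold pvStepA
  rw [pvFoldSet (fun i => xs.getD (xs.length - i - 1) 0 - 3) xs.length xs le_rfl]
  simp only [List.drop_length, List.append_nil]
  apply List.ext_getElem
  · simp
  · intro i h1 h2
    simp only [List.getElem_map, List.getElem_range, List.getElem_reverse]
    rw [List.getD_eq_getElem]
    · congr 2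
      omega
    · simp at h1 ⊢; omega

-- ===== VERDICT (by name: the statement is the Claim_ definition above) =====
theorem reverse_and_decrement_py_spec : Claim_equal_reverse_and_decrement_py := by
  intro xs _
  show reverse_and_decrement_py xs = reverse_and_decrement_py_alt xs
  unfold reverse_and_decrement_py reverse_and_decrement_py_alt
  simp only [List.range_succ, List.range_zero, List.foldl_append, List.foldl_cons,
    List.foldl_nil, pvStepA_eq]
  simp [List.map_reverse, List.reverse_reverse, Function.comp]
  intro a _
  ring
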